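-- pv_equiv track=rewrite | github.com/Gurumurthys1/hackhustle | services/fraud-engine/scoring/engine.py | _build_admin_explanation
-- ===== SOURCE A (Python) =====
-- def _build_admin_explanation(score, tier, evidence, sub_scores) -> str:
--     lines = [f"Fraud Score: {score}/100 — {tier}\n", "Evidence Summary:", "─" * 40]
--
--     categories = {
--         "image": "📷 Image Analysis",
--         "receipt": "🧾 Receipt Validation",
--         "behavioral": "📊 Behavioral Pattern",
--         "carrier": "📦 Carrier Validation",
--         "graph": "🕸️ Network Analysis"
--     }
--
--     for key, label in categories.items():
--         cat_score = sub_scores.get(key, 0)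
--         lines.append(f"\n{label:30s} +{cat_score} pts")
--         cat_evidence = [e for e in evidence if e.get("type", "").startswith(key.upper())]
--         for ev in cat_evidence:
--             lines.append(f"   • {ev['detail']}")
--
--     lines.append(f"\nRecommended Action: {_get_action_label(tier)}")
--     return "\n".join(lines)
--
-- def _get_action_label(tier: str) -> str:
--     labels = {
--         "TRUSTED": "AUTO-APPROVE (no human needed)",
--         "CAUTION": "SOFT CHECK (request additional photo)",
--         "ELEVATED_RISK": "QUEUE FOR HUMAN REVIEW (24hr SLA)",
--         "HIGH_RISK": "ESCALATE TO SENIOR REVIEWER (4hr SLA)"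
--     }
--     return labels.get(tier, "QUEUE FOR HUMAN REVIEW")
-- ===== SOURCE B (Python) =====
-- _CATS = [
--     ("image", "📷 Image Analysis"),
--     ("receipt", "🧾 Receipt Validation"),
--     ("behavioral", "📊 Behavioral Pattern"),
--     ("carrier", "📦 Carrier Validation"),
--     ("graph", "🕸️ Network Analysis"),
-- ]
--
-- _ACTIONS = {
--     "TRUSTED": "AUTO-APPROVE (no human needed)",
--     "CAUTION": "SOFT CHECK (request additional photo)",
--     "ELEVATED_RISK": "QUEUE FOR HUMAN REVIEW (24hr SLA)",
--     "HIGH_RISK": "ESCALATE TO SENIOR REVIEWER (4hr SLA)",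
-- }
--
--
-- def _build_admin_explanation(score, tier, evidence, sub_scores) -> str:
--     # single pass: bucket each evidence entry by category prefix
--     buckets = {k: [] for k, _ in _CATS}
--     for e in evidence:
--         t = e.get("type", "")
--         for k, _ in _CATS:
--             if t.startswith(k.upper()):
--                 buckets[k].append(e)
--     out = [f"Fraud Score: {score}/100 — {tier}\n", "Evidence Summary:", "─" * 40]
--     for k, label in _CATS:
--         out.append(f"\n{label:30s} +{sub_scores.get(k, 0)} pts")
--         for ev in buckets[k]:
--             out.append(f"   • {ev['detail']}")
--     out.append(f"\nRecommended Action: {_ACTIONS.get(tier, 'QUEUE FOR HUMAN REVIEW')}")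
--     return "\n".join(out)
-- ===== Notes on version B (the rewrite author's own statement) =====
-- stated objective: alternative
-- what changed: A re-scans the whole evidence list once per category (five filter passes); B makes a single bucketing pass over evidence into a dict mapping category key to its entries, then emits the report from the buckets.
import Mathlib
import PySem

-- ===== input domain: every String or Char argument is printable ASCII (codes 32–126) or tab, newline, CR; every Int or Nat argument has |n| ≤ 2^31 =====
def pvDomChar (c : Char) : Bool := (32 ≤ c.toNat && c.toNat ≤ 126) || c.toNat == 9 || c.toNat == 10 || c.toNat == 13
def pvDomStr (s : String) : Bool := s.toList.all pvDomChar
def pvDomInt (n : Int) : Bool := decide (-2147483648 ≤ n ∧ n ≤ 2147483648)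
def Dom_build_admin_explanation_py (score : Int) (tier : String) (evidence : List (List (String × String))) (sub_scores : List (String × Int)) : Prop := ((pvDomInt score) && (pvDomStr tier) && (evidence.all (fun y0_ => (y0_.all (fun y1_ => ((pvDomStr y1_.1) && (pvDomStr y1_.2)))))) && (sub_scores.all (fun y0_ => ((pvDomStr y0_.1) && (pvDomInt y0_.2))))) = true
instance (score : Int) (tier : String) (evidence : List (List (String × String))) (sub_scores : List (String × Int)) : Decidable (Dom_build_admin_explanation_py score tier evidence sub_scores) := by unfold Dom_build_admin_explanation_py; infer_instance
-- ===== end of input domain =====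

-- B replaces A's five full filter scans of `evidence` with one bucketing pass into a dict keyed by category.

-- shared formatting helpers (both Pythons format the same way)
-- f"{label:30s}": left-justify to width 30 with spaces (exact: Python pads by code points, no pad if already ≥ 30)
def pvPad30 (s : String) : String := s ++ String.mk (List.replicate ((30 - PySem.Str.len s).toNat) ' ')

-- _get_action_label / _ACTIONS.get(tier, ...): dict literal lookup with default
def pvActionLabel (tier : String) : String :=
  (PySem.Dict.ofList [("TRUSTED", "AUTO-APPROVE (no human needed)"),
                      ("CAUTION", "SOFT CHECK (request additional photo)"),
                      ("ELEVATED_RISK", "QUEUE FOR HUMAN REVIEW (24hr SLA)"),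
                      ("HIGH_RISK", "ESCALATE TO SENIOR REVIEWER (4hr SLA)")]).getD tier "QUEUE FOR HUMAN REVIEW"

def pvCats : List (String × String) :=
  [("image", "📷 Image Analysis"),
   ("receipt", "🧾 Receipt Validation"),
   ("behavioral", "📊 Behavioral Pattern"),
   ("carrier", "📦 Carrier Validation"),
   ("graph", "🕸️ Network Analysis")]

-- ===== PORT A =====
-- ev['detail'] raises KeyError when absent: Pre_ excludes that, the port totalizes with .getD ""
def build_admin_explanation_py (score : Int) (tier : String) (evidence : List (List (String × String))) (sub_scores : List (String × Int)) : String :=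
  let lines : List String :=
    ["Fraud Score: " ++ PySem.Int.toStr score ++ "/100 — " ++ tier ++ "\n",
     "Evidence Summary:", String.mk (List.replicate 40 '─')]
  let lines := pvCats.foldl (fun ls kl =>
      let cat_score := (PySem.Dict.mk sub_scores).getD kl.1 0
      let ls := ls ++ ["\n" ++ pvPad30 kl.2 ++ " +" ++ PySem.Int.toStr cat_score ++ " pts"]
      let cat_evidence := evidence.filter (fun e =>
        PySem.Str.startswith ((PySem.Dict.mk e).getD "type" "") (PySem.Str.upper kl.1))
      ls ++ cat_evidence.map (fun ev => "   • " ++ ((PySem.Dict.mk ev).get? "detail").getD "")) lines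
  let lines := lines ++ ["\nRecommended Action: " ++ pvActionLabel tier]
  PySem.Str.join "\n" lines

-- ===== PORT B =====
def build_admin_explanation_py_alt (score : Int) (tier : String) (evidence : List (List (String × String))) (sub_scores : List (String × Int)) : String :=
  let buckets :=
    evidence.foldl (fun d e =>
        let t := (PySem.Dict.mk e).getD "type" ""
        pvCats.foldl (fun d kl =>
          if PySem.Str.startswith t (PySem.Str.upper kl.1) then d.modify kl.1 [] (· ++ [e]) else d) d)
      (pvCats.foldl (fun d kl => d.insert kl.1 ([] : List (List (String × String)))) PySem.Dict.empty)
  let out : List String :=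
    ["Fraud Score: " ++ PySem.Int.toStr score ++ "/100 — " ++ tier ++ "\n",
     "Evidence Summary:", String.mk (List.replicate 40 '─')]
  let out := pvCats.foldl (fun ls kl =>
      (ls ++ ["\n" ++ pvPad30 kl.2 ++ " +" ++ PySem.Int.toStr ((PySem.Dict.mk sub_scores).getD kl.1 0) ++ " pts"]) ++
      (buckets.getD kl.1 []).map (fun ev => "   • " ++ ((PySem.Dict.mk ev).get? "detail").getD "")) out
  PySem.Str.join "\n" (out ++ ["\nRecommended Action: " ++ pvActionLabel tier])

-- ===== PRECONDITION & SPEC =====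
-- Pre_ excludes inputs where A raises KeyError: an evidence entry whose type matches a category but has no 'detail' key.
def Pre_build_admin_explanation_py (score : Int) (tier : String) (evidence : List (List (String × String))) (sub_scores : List (String × Int)) : Prop :=
  ∀ e ∈ evidence,
    (pvCats.any (fun kl => PySem.Str.startswith ((PySem.Dict.mk e).getD "type" "") (PySem.Str.upper kl.1))) = true →
    (PySem.Dict.mk e).contains "detail" = true
instance (score : Int) (tier : String) (evidence : List (List (String × String))) (sub_scores : List (String × Int)) : Decidable (Pre_build_admin_explanation_py score tier evidence sub_scores) := by unfold Pre_build_admin_explanation_py; infer_instance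

def pvWitness_build_admin_explanation_py : Int × String × (List (List (String × String))) × (List (String × Int)) :=
  (42, "CAUTION", [[("type", "IMAGE_EXIF"), ("detail", "exif stripped")], [("type", "OTHER")]], [("image", 25), ("graph", 5)])

def Spec_build_admin_explanation_py (score : Int) (tier : String) (evidence : List (List (String × String))) (sub_scores : List (String × Int)) (out : String) : Prop := out = build_admin_explanation_py_alt score tier evidence sub_scores
instance (score : Int) (tier : String) (evidence : List (List (String × String))) (sub_scores : List (String × Int)) (out : String) : Decidable (Spec_build_admin_explanation_py score tier evidence sub_scores out) := by unfold Spec_build_admin_explanation_py; infer_instance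

-- ===== CLAIM (what is proved, stated in full; the proofs are below) =====
def Claim_equal_build_admin_explanation_py : Prop := ∀ (score : Int) (tier : String) (evidence : List (List (String × String))) (sub_scores : List (String × Int)), Dom_build_admin_explanation_py score tier evidence sub_scores → Pre_build_admin_explanation_py score tier evidence sub_scores → Spec_build_admin_explanation_py score tier evidence sub_scores (build_admin_explanation_py score tier evidence sub_scores)

-- ===== LEMMAS AND PROOFS =====

theorem pvWitness_ok :
    Dom_build_admin_explanation_py (pvWitness_build_admin_explanation_py.1) (pvWitness_build_admin_explanation_py.2.1) (pvWitness_build_admin_explanation_py.2.2.1) (pvWitness_build_admin_explanation_py.2.2.2) ∧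
    Pre_build_admin_explanation_py (pvWitness_build_admin_explanation_py.1) (pvWitness_build_admin_explanation_py.2.1) (pvWitness_build_admin_explanation_py.2.2.1) (pvWitness_build_admin_explanation_py.2.2.2) := by
  constructor <;> decide

-- the predicate "entry e belongs to category key c"
def pvPred (c : String) (e : List (String × String)) : Bool :=
  PySem.Str.startswith ((PySem.Dict.mk e).getD "type" "") (PySem.Str.upper c)

-- one bucketing step: only bucket c gains e, and only when pvPred c e
theorem pv_step_getD (d : PySem.Dict String (List (List (String × String)))) (e : List (String × String)) (c : String)
    (hc : c = "image" ∨ c = "receipt" ∨ c = "behavioral" ∨ c = "carrier" ∨ c = "graph") :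
    (pvCats.foldl (fun d kl =>
        if PySem.Str.startswith ((PySem.Dict.mk e).getD "type" "") (PySem.Str.upper kl.1)
        then d.modify kl.1 [] (· ++ [e]) else d) d).getD c []
      = d.getD c [] ++ (if pvPred c e then [e] else []) := by
  rcases hc with rfl | rfl | rfl | rfl | rfl <;>
    simp only [pvCats, pvPred, List.foldl] <;>
    split_ifs <;>
    simp_all [PySem.Dict.getD_modify]

-- bucket invariant over the whole evidence pass
theorem pv_buckets_getD (evidence : List (List (String × String))) (d : PySem.Dict String (List (List (String × String)))) (c : String)
    (hc : c = "image" ∨ c = "receipt" ∨ c = "behavioral" ∨ c = "carrier" ∨ c = "graph") :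
    (evidence.foldl (fun d e =>
        pvCats.foldl (fun d kl =>
          if PySem.Str.startswith ((PySem.Dict.mk e).getD "type" "") (PySem.Str.upper kl.1)
          then d.modify kl.1 [] (· ++ [e]) else d) d) d).getD c []
      = d.getD c [] ++ evidence.filter (pvPred c) := by
  induction evidence generalizing d with
  | nil => simp
  | cons e rest ih =>
    simp only [List.foldl, List.filter]
    rw [ih, pv_step_getD d e c hc]
    cases h : pvPred c e <;> simp [h]

-- the initial dict {k: [] for k,_ in cats} has empty buckets
theorem pv_init_getD (c : String) :
    (pvCats.foldl (fun d kl => d.insert kl.1 ([] : List (List (String × String)))) PySem.Dict.empty).getD c [] = [] := by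
  simp only [pvCats, List.foldl]
  simp [PySem.Dict.getD_insert]

-- ===== VERDICT (by name: the statement is the Claim_ definition above) =====
theorem build_admin_explanation_py_spec : Claim_equal_build_admin_explanation_py := by
  intro score tier evidence sub_scores _ _
  unfold Spec_build_admin_explanation_py build_admin_explanation_py build_admin_explanation_py_alt
  have h : ∀ c, (c = "image" ∨ c = "receipt" ∨ c = "behavioral" ∨ c = "carrier" ∨ c = "graph") →
      (evidence.foldl (fun d e =>
          pvCats.foldl (fun d kl =>
            if PySem.Str.startswith ((PySem.Dict.mk e).getD "type" "") (PySem.Str.upper kl.1)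
            then d.modify kl.1 [] (· ++ [e]) else d) d)
        (pvCats.foldl (fun d kl => d.insert kl.1 ([] : List (List (String × String)))) PySem.Dict.empty)).getD c []
        = evidence.filter (pvPred c) := by
    intro c hc
    rw [pv_buckets_getD evidence _ c hc, pv_init_getD, List.nil_append]
  simp only [pvCats, pvPred, List.foldl] at h ⊢
  rw [h "image" (by tauto), h "receipt" (by tauto), h "behavioral" (by tauto),
      h "carrier" (by tauto), h "graph" (by tauto)]
  rfl
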